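-- pv_equiv track=rewrite | github.com/Guacore/ICE | ice_lib/retrieve.py | retrieve_by_popularity
-- ===== SOURCE A (Python) =====
-- from collections import Counter
--
-- def retrieve_by_popularity(quota, cand_list, popularity_dict):
--     """ Retrieve the top-k most popular items.
--     Param:
--         param1 [int] number of items to retrieve.
--         param2 [list] of candidate items.
--         param3 [dict] where key=item & val=popularity.
--     Return:
--         return1 [list] of retrieved items ordered descendingly by popularity.
--     """
--     result_list = [] # return1
--
--     # Step 1: Descendingly sort the songs by popularity.
--     item_list = [i for (i,_) in Counter(popularity_dict).most_common()]
--
--     # Step 2: Retrieve the top-k most popular items.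
--     for item in item_list:
--         if len(result_list) >= quota:
--             break
--         if item in cand_list:
--             result_list.append(item)
--
--     return result_list
-- ===== SOURCE B (Python) =====
-- import heapq
--
-- def retrieve_by_popularity(quota, cand_list, popularity_dict):
--     """Filter first, then pick the top-quota candidates with a heap-based partial selection."""
--     cand_set = set(cand_list)
--     candidates = [item for item in popularity_dict if item in cand_set]
--     return heapq.nlargest(quota, candidates, key=lambda x: popularity_dict[x])
-- ===== Notes on version B (the rewrite author's own statement) =====
-- stated objective: faster
-- what changed: A sorts all dict items descending and then scans them with an early-break loop doing a list-membership test per item; B filters the dict keys first through a set and selects the top quota directly with heapq.nlargest.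
import Mathlib
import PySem

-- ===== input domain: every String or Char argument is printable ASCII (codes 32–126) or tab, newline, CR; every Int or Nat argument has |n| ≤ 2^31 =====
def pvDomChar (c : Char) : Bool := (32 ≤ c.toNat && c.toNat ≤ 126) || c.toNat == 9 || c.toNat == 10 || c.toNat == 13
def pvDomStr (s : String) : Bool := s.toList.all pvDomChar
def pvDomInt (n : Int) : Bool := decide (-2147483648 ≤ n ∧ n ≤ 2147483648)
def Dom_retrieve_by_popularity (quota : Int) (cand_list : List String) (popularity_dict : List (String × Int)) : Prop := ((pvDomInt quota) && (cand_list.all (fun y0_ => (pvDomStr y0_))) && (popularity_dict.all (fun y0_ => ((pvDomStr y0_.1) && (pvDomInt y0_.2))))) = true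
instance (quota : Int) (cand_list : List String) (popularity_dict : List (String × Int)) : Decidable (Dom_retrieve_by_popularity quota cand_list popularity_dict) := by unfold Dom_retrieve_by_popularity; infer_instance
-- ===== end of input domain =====

-- B replaces A's sort-everything-then-guarded-scan-with-break by filter-first plus a
-- heapq.nlargest partial selection over a set for membership (objective: faster selection path).

-- ===== PORT A =====
-- A's Step-2 for-loop, with its break (len(result_list) >= quota) and 'item in cand_list' test
def pvLoopA (quota : Int) (cand_list : List String) : List String → List String → List String
  | [], res => res
  | i :: t, res =>
    if (res.length : Int) ≥ quota then res
    else if i ∈ cand_list then pvLoopA quota cand_list t (res ++ [i])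
    else pvLoopA quota cand_list t res

def retrieve_by_popularity (quota : Int) (cand_list : List String) (popularity_dict : List (String × Int)) : List String :=
  let d := PySem.Dict.ofList popularity_dict
  -- Counter(popularity_dict).most_common() = its items sorted by value, reverse=True (stable)
  let item_list := (PySem.List.sorted d.items (fun p => p.2) true).map (fun p => p.1)
  pvLoopA quota cand_list item_list []

-- ===== PORT B =====
def retrieve_by_popularity_alt (quota : Int) (cand_list : List String) (popularity_dict : List (String × Int)) : List String :=
  let d := PySem.Dict.ofList popularity_dict
  let cand_set := PySem.Set.ofList cand_list
  let candidates := d.keys.filter (fun k => PySem.Set.contains cand_set k)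
  -- heapq.nlargest(quota, candidates, key) ported as its documented meaning
  -- sorted(candidates, key=key, reverse=True)[:quota]; exact also for quota ≤ 0 (empty result).
  -- key=lambda x: popularity_dict[x] is d.getD x 0: exact, every candidate is a key of d.
  (PySem.List.sorted candidates (fun k => d.getD k 0) true).take quota.toNat

-- ===== PRECONDITION & SPEC =====
def Spec_retrieve_by_popularity (quota : Int) (cand_list : List String) (popularity_dict : List (String × Int)) (out : List String) : Prop := out = retrieve_by_popularity_alt quota cand_list popularity_dict
instance (quota : Int) (cand_list : List String) (popularity_dict : List (String × Int)) (out : List String) : Decidable (Spec_retrieve_by_popularity quota cand_list popularity_dict out) := by unfold Spec_retrieve_by_popularity; infer_instance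

-- ===== CLAIM (what is proved, stated in full; the proofs are below) =====
def Claim_equal_retrieve_by_popularity : Prop := ∀ (quota : Int) (cand_list : List String) (popularity_dict : List (String × Int)), Dom_retrieve_by_popularity quota cand_list popularity_dict → Spec_retrieve_by_popularity quota cand_list popularity_dict (retrieve_by_popularity quota cand_list popularity_dict)

-- ===== LEMMAS AND PROOFS =====

-- A's break-at-quota loop collects the first (quota - len res) matching items
theorem pvLoopA_eq (quota : Int) (cl : List String) :
    ∀ (t res : List String),
      pvLoopA quota cl t res
        = res ++ (t.filter (fun i => decide (i ∈ cl))).take (quota - res.length).toNat := by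
  intro t
  induction t with
  | nil => intro res; simp [pvLoopA]
  | cons i t ih =>
    intro res
    by_cases hq : (res.length : Int) ≥ quota
    · have h0 : (quota - (res.length : Int)).toNat = 0 := by omega
      simp [pvLoopA, hq, h0]
    · have h1 : 1 ≤ quota - (res.length : Int) := by omega
      obtain ⟨k, hk⟩ : ∃ k, (quota - (res.length : Int)).toNat = k + 1 := ⟨(quota - (res.length : Int)).toNat - 1, by omega⟩
      by_cases hm : i ∈ cl
      · have hstep : pvLoopA quota cl (i :: t) res = pvLoopA quota cl t (res ++ [i]) := by
          simp [pvLoopA, hq, hm]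
        have hk2 : (quota - ((res ++ [i]).length : Int)).toNat = k := by
          simp only [List.length_append, List.length_cons, List.length_nil]
          push_cast
          omega
        rw [hstep, ih, hk2, List.filter_cons, if_pos (by simpa using hm), hk, List.take_succ_cons]
        simp
      · simp [pvLoopA, hq, hm, ih, List.filter_cons]

-- insertBy commutes with map when the comparison factors through the map
theorem pv_insertBy_map {α β : Type} (f : α → β) (b : α → α → Bool) (b' : β → β → Bool)
    (hb : ∀ a c, b' (f a) (f c) = b a c) (x : α) :
    ∀ ys : List α,
      PySem.List.insertBy b' (f x) (ys.map f) = (PySem.List.insertBy b x ys).map f := by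
  intro ys
  induction ys with
  | nil => simp [PySem.List.insertBy]
  | cons y ys ih =>
    simp only [List.map_cons, PySem.List.insertBy, hb]
    by_cases h : b x y
    · simp [h]
    · simp [h, ih]

-- a stable reverse-sort of a mapped list is the mapped stable reverse-sort
theorem pv_sorted_map {α β κ : Type} [LinearOrder κ] (f : α → β) (key : β → κ) (xs : List α) :
    PySem.List.sorted (xs.map f) key true
      = (PySem.List.sorted xs (fun a => key (f a)) true).map f := by
  rw [PySem.List.sorted_rev_eq_foldl_insertBy, PySem.List.sorted_rev_eq_foldl_insertBy]
  have main : ∀ (l : List α) (acc : List α),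
      (l.map f).foldl (fun acc x => PySem.List.insertBy (fun a b => decide (key b < key a)) x acc) (acc.map f)
        = (l.foldl (fun acc x => PySem.List.insertBy (fun a b => decide (key (f b) < key (f a))) x acc) acc).map f := by
    intro l
    induction l with
    | nil => intro acc; simp
    | cons x l ih =>
      intro acc
      simp only [List.map_cons, List.foldl_cons]
      rw [pv_insertBy_map f (fun a c => decide (key (f c) < key (f a))) (fun a c => decide (key c < key a)) (fun a c => rfl) x acc]
      exact ih _
  simpa using main xs []

-- insertBy with the reverse comparison preserves descending pairwise order
theorem pv_insertBy_pairwise {α κ : Type} [LinearOrder κ] (key : α → κ) (x : α) :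
    ∀ ys : List α, ys.Pairwise (fun a b => key b ≤ key a) →
      (PySem.List.insertBy (fun a b => decide (key b < key a)) x ys).Pairwise (fun a b => key b ≤ key a) := by
  intro ys
  induction ys with
  | nil => intro _; simp [PySem.List.insertBy]
  | cons y ys ih =>
    intro hp
    rw [List.pairwise_cons] at hp
    obtain ⟨h1, h2⟩ := hp
    simp only [PySem.List.insertBy]
    by_cases h : key y < key x
    · simp only [decide_eq_true_eq, h, if_pos]
      constructor
      · intro z hz
        rcases List.mem_cons.mp hz with rfl | hz'
        · exact le_of_lt h
        · exact le_trans (h1 z hz') (le_of_lt h)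
      · exact List.pairwise_cons.mpr ⟨h1, h2⟩
    · simp only [decide_eq_true_eq, h, if_neg, if_false]
      refine List.pairwise_cons.mpr ⟨?_, ih h2⟩
      intro z hz
      rcases (PySem.List.mem_insertBy _ _ _ _).mp hz with rfl | hz'
      · exact le_of_not_gt h
      · exact h1 z hz'

-- x inserts at the front when it strictly beats every element
theorem pv_insertBy_front {α κ : Type} [LinearOrder κ] (key : α → κ) (x : α) (l : List α)
    (h : ∀ z ∈ l, key z < key x) :
    PySem.List.insertBy (fun a b => decide (key b < key a)) x l = x :: l := by
  cases l with
  | nil => simp [PySem.List.insertBy]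
  | cons y ys => simp [PySem.List.insertBy, h y (List.mem_cons_self)]

-- filtering commutes with insertion into a descending list
theorem pv_insertBy_filter {α κ : Type} [LinearOrder κ] (key : α → κ) (p : α → Bool) (x : α) :
    ∀ ys : List α, ys.Pairwise (fun a b => key b ≤ key a) →
      (PySem.List.insertBy (fun a b => decide (key b < key a)) x ys).filter p
        = if p x then PySem.List.insertBy (fun a b => decide (key b < key a)) x (ys.filter p)
          else ys.filter p := by
  intro ys
  induction ys with
  | nil =>
    intro _
    by_cases h : p x <;> simp [PySem.List.insertBy, List.filter_cons, h]
  | cons y ys ih =>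
    intro hp
    rw [List.pairwise_cons] at hp
    obtain ⟨h1, h2⟩ := hp
    simp only [PySem.List.insertBy]
    by_cases hxy : key y < key x
    · simp only [decide_eq_true_eq, hxy, if_pos]
      have hall : ∀ z ∈ (y :: ys).filter p, key z < key x := by
        intro z hz
        rcases List.mem_cons.mp (List.mem_of_mem_filter hz) with rfl | hz'
        · exact hxy
        · exact lt_of_le_of_lt (h1 z hz') hxy
      by_cases hx : p x
      · rw [pv_insertBy_front key x _ hall]
        simp [List.filter_cons, hx]
      · simp [List.filter_cons, hx]
    · simp only [decide_eq_true_eq, hxy, if_neg, if_false]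
      by_cases hy : p y
      · simp only [List.filter_cons, hy, if_pos, ih h2]
        by_cases hx : p x
        · simp [hx, PySem.List.insertBy, hxy]
        · simp [hx]
      · simp [List.filter_cons, hy, ih h2]

-- a stable reverse-sort commutes with filtering
theorem pv_sorted_filter {α κ : Type} [LinearOrder κ] (key : α → κ) (p : α → Bool) (xs : List α) :
    (PySem.List.sorted xs key true).filter p = PySem.List.sorted (xs.filter p) key true := by
  rw [PySem.List.sorted_rev_eq_foldl_insertBy, PySem.List.sorted_rev_eq_foldl_insertBy]
  have main : ∀ (l : List α) (acc : List α), acc.Pairwise (fun a b => key b ≤ key a) →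
      (l.foldl (fun acc x => PySem.List.insertBy (fun a b => decide (key b < key a)) x acc) acc).filter p
        = (l.filter p).foldl (fun acc x => PySem.List.insertBy (fun a b => decide (key b < key a)) x acc) (acc.filter p) := by
    intro l
    induction l with
    | nil => intro acc _; simp
    | cons x l ih =>
      intro acc hacc
      simp only [List.foldl_cons, List.filter_cons]
      rw [ih _ (pv_insertBy_pairwise key x acc hacc),
          pv_insertBy_filter key p x acc hacc]
      by_cases hx : p x <;> simp [hx]
  simpa using main xs [] List.Pairwise.nil

-- ===== VERDICT (by name: the statement is the Claim_ definition above) =====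
theorem retrieve_by_popularity_spec : Claim_equal_retrieve_by_popularity := by
  intro quota cand_list popularity_dict _
  unfold Spec_retrieve_by_popularity retrieve_by_popularity retrieve_by_popularity_alt
  simp only []
  set d := PySem.Dict.ofList popularity_dict with hd
  have hnd : d.keys.Nodup := PySem.Dict.nodup_keys_ofList popularity_dict
  -- A's loop is a take of the filtered sorted item list
  rw [pvLoopA_eq]
  simp only [List.nil_append, List.length_nil, Int.natCast_zero, sub_zero]
  -- items = keys paired with their values
  rw [PySem.Dict.items_eq_map_keys d hnd 0]
  rw [pv_sorted_map (fun k => (k, d.getD k 0)) (fun p => p.2)]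
  rw [List.map_map, List.filter_map]
  have hcomp : ((fun p : String × Int => p.1) ∘ fun k => (k, d.getD k 0)) = id := rfl
  rw [hcomp, List.map_id]
  rw [pv_sorted_filter]
  -- the two membership predicates agree
  have hpred : (fun i => decide (i ∈ cand_list)) = (fun k => PySem.Set.contains (PySem.Set.ofList cand_list) k) := by
    funext k
    simp [PySem.Set.contains, PySem.Set.mem_ofList]
  rw [hpred]
  simp [Function.comp]
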